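-- pv_equiv track=rewrite | github.com/SantosJGND/INSaFLU | pathogen_identification/ajax_views.py | excise_paths_leaf_last
-- ===== SOURCE A (Python) =====
-- def excise_paths_leaf_last(string_with_paths: str):
--     """
--     if the string has paths, find / and return the last
--     """
--     split_space = string_with_paths.split(" ")
--     new_string = ""
--     if len(split_space) > 1:
--         for word in split_space:
--             new_word = word
--             if "/" in word:
--                 new_word = word.split("/")[-1]
--             new_string += new_word + " "
--         return new_string
--     else:
--         return string_with_paths
-- ===== SOURCE B (Python) =====
-- def excise_paths_leaf_last(string_with_paths: str):
--     """
--     if the string has paths, find / and return the last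
--     """
--     if " " not in string_with_paths:
--         return string_with_paths
--     out = []
--     cur = []
--     for ch in string_with_paths:
--         if ch == " ":
--             out += cur
--             out.append(" ")
--             cur = []
--         elif ch == "/":
--             cur = []
--         else:
--             cur.append(ch)
--     out += cur
--     out.append(" ")
--     return "".join(out)
-- ===== Notes on version B (the rewrite author's own statement) =====
-- stated objective: alternative
-- what changed: Replaces the split-on-space / per-word split-on-slash / string-rebuild with a single left-to-right character scan that resets the current-word buffer at each slash and flushes it at each space, joining once at the end.
import Mathlib
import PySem

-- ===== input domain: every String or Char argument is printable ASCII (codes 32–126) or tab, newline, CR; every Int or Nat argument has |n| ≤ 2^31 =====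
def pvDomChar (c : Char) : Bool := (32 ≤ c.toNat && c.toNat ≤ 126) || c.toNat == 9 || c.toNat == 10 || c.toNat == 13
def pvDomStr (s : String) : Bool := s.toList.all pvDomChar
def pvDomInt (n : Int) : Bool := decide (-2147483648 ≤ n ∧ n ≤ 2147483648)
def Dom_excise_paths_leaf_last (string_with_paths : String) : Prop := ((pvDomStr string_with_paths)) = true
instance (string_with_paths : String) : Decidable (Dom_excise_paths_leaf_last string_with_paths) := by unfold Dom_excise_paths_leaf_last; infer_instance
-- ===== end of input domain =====

-- B replaces the split/per-word-split/rebuild of A by one character scan with a buffer reset at each slash; same O(n) cost, alternative structure.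

-- ===== PORT A =====
-- split? returns some here (separators " " and "/" are nonempty) and pyGet? returns some
-- (a split result is never the empty list); the .getD only unwraps — exact transliteration.
def excise_paths_leaf_last (string_with_paths : String) : String :=
  let split_space := (PySem.Str.split? string_with_paths " ").getD []
  if split_space.length > 1 then
    split_space.foldl (fun new_string word =>
      let new_word :=
        if PySem.Str.isIn "/" word then
          (PySem.List.pyGet? ((PySem.Str.split? word "/").getD []) (-1)).getD word
        else word
      new_string ++ new_word ++ " ") ""
  else string_with_paths

-- ===== PORT B =====
def excise_paths_leaf_last_alt (string_with_paths : String) : String :=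
  if PySem.Str.isIn " " string_with_paths then
    let st := string_with_paths.toList.foldl
      (fun (p : List Char × List Char) ch =>
        if ch = ' ' then (p.1 ++ p.2 ++ [' '], [])
        else if ch = '/' then (p.1, [])
        else (p.1, p.2 ++ [ch])) ([], [])
    String.ofList (st.1 ++ st.2 ++ [' '])
  else string_with_paths

-- ===== PRECONDITION & SPEC =====
def Spec_excise_paths_leaf_last (string_with_paths : String) (out : String) : Prop := out = excise_paths_leaf_last_alt string_with_paths
instance (string_with_paths : String) (out : String) : Decidable (Spec_excise_paths_leaf_last string_with_paths out) := by unfold Spec_excise_paths_leaf_last; infer_instance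

-- ===== CLAIM (what is proved, stated in full; the proofs are below) =====
def Claim_equal_excise_paths_leaf_last : Prop := ∀ (string_with_paths : String), Dom_excise_paths_leaf_last string_with_paths → Spec_excise_paths_leaf_last string_with_paths (excise_paths_leaf_last string_with_paths)

-- ===== LEMMAS AND PROOFS =====

-- the loop body of port B, named for the proofs
def pvStep (p : List Char × List Char) (ch : Char) : List Char × List Char :=
  if ch = ' ' then (p.1 ++ p.2 ++ [' '], [])
  else if ch = '/' then (p.1, [])
  else (p.1, p.2 ++ [ch])

-- simple structural single-character split (proof-side model of Chars.splitOn l [c])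
def pvSplitc (c : Char) : List Char → List (List Char)
  | [] => [[]]
  | a :: rest =>
    if a = c then [] :: pvSplitc c rest
    else (a :: (pvSplitc c rest).headI) :: (pvSplitc c rest).tail

-- the part of a word after its last '/'
def pvLastc : List Char → List Char
  | [] => []
  | c :: u => if c = '/' then pvLastc u else if '/' ∈ u then pvLastc u else c :: u

-- recursive model of B's scan: output contributed by the rest of the string, given the current buffer
def pvS : List Char → List Char → List Char
  | [], cur => cur ++ [' ']
  | c :: cs, cur =>
    if c = ' ' then cur ++ ' ' :: pvS cs []
    else if c = '/' then pvS cs []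
    else pvS cs (cur ++ [c])

theorem pvSplitc_ne_nil (c : Char) (l : List Char) : pvSplitc c l ≠ [] := by
  cases l with
  | nil => simp [pvSplitc]
  | cons a rest => simp only [pvSplitc]; split_ifs <;> simp

theorem cons_headI_tail {α : Type} [Inhabited α] (l : List α) (h : l ≠ []) :
    l.headI :: l.tail = l := by
  cases l with
  | nil => exact absurd rfl h
  | cons a t => rfl

theorem go_eq (c : Char) : ∀ (fuel : Nat) (l cur : List Char) (acc : List (List Char)), l.length < fuel →
    PySem.Chars.splitOn.go [c] fuel l cur acc
      = acc.reverse ++ (cur.reverse ++ (pvSplitc c l).headI) :: (pvSplitc c l).tail := by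
  intro fuel
  induction fuel with
  | zero => intro l cur acc h; omega
  | succ n ih =>
    intro l cur acc h
    cases l with
    | nil => rw [PySem.Chars.splitOn.go.eq_def]; simp [pvSplitc]
    | cons a rest =>
      rw [PySem.Chars.splitOn.go.eq_def]
      by_cases hac : a = c
      · subst hac
        have hpre : List.isPrefixOf [a] (a :: rest) = true := by
          simp [List.isPrefixOf]
        simp only [hpre, if_pos, List.length_cons, List.length_nil, List.drop_succ_cons,
          List.drop_zero]
        rw [ih rest [] (cur.reverse :: acc) (by simpa using Nat.lt_of_succ_lt_succ h)]
        simp [pvSplitc, cons_headI_tail _ (pvSplitc_ne_nil a rest)]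
      · have hpre : List.isPrefixOf [c] (a :: rest) = false := by
          simp [List.isPrefixOf, BEq.beq]
          intro hh
          exact absurd hh.symm hac
        simp only [hpre, Bool.false_eq_true, if_false]
        rw [ih rest (a :: cur) acc (by simpa using Nat.lt_of_succ_lt_succ h)]
        simp [pvSplitc, hac]

theorem splitOn_single (c : Char) (l : List Char) :
    PySem.Chars.splitOn l [c] = pvSplitc c l := by
  unfold PySem.Chars.splitOn
  rw [go_eq c (l.length + 1) l [] [] (by omega)]
  simp [cons_headI_tail _ (pvSplitc_ne_nil c l)]

theorem pvLastc_of_not_mem (w : List Char) (h : '/' ∉ w) : pvLastc w = w := by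
  induction w with
  | nil => rfl
  | cons a u ih =>
    simp only [List.mem_cons, not_or] at h
    simp [pvLastc, Ne.symm h.1, h.2]

theorem pvSplitc_of_not_mem (c : Char) (w : List Char) (h : c ∉ w) : pvSplitc c w = [w] := by
  induction w with
  | nil => rfl
  | cons a u ih =>
    simp only [List.mem_cons, not_or] at h
    simp [pvSplitc, Ne.symm h.1, ih h.2]

theorem two_le_pvSplitc_of_mem (c : Char) (l : List Char) (h : c ∈ l) :
    2 ≤ (pvSplitc c l).length := by
  induction l with
  | nil => simp at h
  | cons a rest ih =>
    by_cases hac : a = c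
    · have := List.length_pos_iff.mpr (pvSplitc_ne_nil c rest)
      simp [pvSplitc, hac]; omega
    · have hm : c ∈ rest := by
        rcases List.mem_cons.mp h with h1 | h1
        · exact absurd h1.symm hac
        · exact h1
      have h2 := ih hm
      have h3 := cons_headI_tail _ (pvSplitc_ne_nil c rest)
      have h4 : (pvSplitc c rest).tail.length = (pvSplitc c rest).length - 1 := by
        simp
      simp [pvSplitc, hac]
      omega

theorem getLast?_cons_ne {α : Type} (a : α) (l : List α) (h : l ≠ []) :
    (a :: l).getLast? = l.getLast? := by
  cases l with
  | nil => exact absurd rfl h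
  | cons b t => simp [List.getLast?_cons_cons]

theorem getLast?_pvSplitc_slash (w : List Char) :
    (pvSplitc '/' w).getLast? = some (pvLastc w) := by
  induction w with
  | nil => rfl
  | cons a u ih =>
    by_cases ha : a = '/'
    · subst ha
      rw [show pvSplitc '/' ('/' :: u) = [] :: pvSplitc '/' u from by simp [pvSplitc]]
      rw [getLast?_cons_ne _ _ (pvSplitc_ne_nil '/' u), ih]
      simp [pvLastc]
    · by_cases hm : '/' ∈ u
      · have h2 := two_le_pvSplitc_of_mem '/' u hm
        have htail : (pvSplitc '/' u).tail ≠ [] := by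
          have hlen : (pvSplitc '/' u).tail.length = (pvSplitc '/' u).length - 1 := by simp
          intro hc
          rw [hc] at hlen
          simp at hlen
          omega
        have ih' := ih
        rw [← cons_headI_tail _ (pvSplitc_ne_nil '/' u), getLast?_cons_ne _ _ htail] at ih'
        rw [show pvSplitc '/' (a :: u)
            = (a :: (pvSplitc '/' u).headI) :: (pvSplitc '/' u).tail from by
          simp [pvSplitc, ha]]
        rw [getLast?_cons_ne _ _ htail, ih']
        simp [pvLastc, ha, hm]
      · simp [pvSplitc_of_not_mem '/' u hm, pvSplitc, ha, pvLastc, hm]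

theorem pyGet?_neg_one {α : Type} (l : List α) : PySem.List.pyGet? l (-1) = l.getLast? := by
  cases l with
  | nil => rfl
  | cons a t =>
    simp [PySem.List.pyGet?, PySem.List.pyIdx?, List.getLast?_eq_getElem?]

theorem singleton_infix_mem (a : Char) (l : List Char) : [a] <:+: l ↔ a ∈ l :=
  List.singleton_infix_iff a l

theorem isIn_single (a : Char) (s : String) :
    PySem.Str.isIn (String.ofList [a]) s = true ↔ a ∈ s.toList := by
  rw [PySem.Str.isIn, String.toList_ofList, PySem.Chars.isIn_iff_infix]
  exact singleton_infix_mem a s.toList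

-- A's per-word computation equals pvLastc on the character level
theorem aWord_eq (w : List Char) :
    (if PySem.Str.isIn "/" (String.ofList w) then
        (PySem.List.pyGet? ((PySem.Str.split? (String.ofList w) "/").getD []) (-1)).getD (String.ofList w)
      else (String.ofList w)) = String.ofList (pvLastc w) := by
  have hslash : ("/" : String) = String.ofList ['/'] := rfl
  by_cases hm : '/' ∈ w
  · rw [if_pos (by rw [hslash]; exact (isIn_single '/' (String.ofList w)).mpr (by simpa using hm))]
    rw [PySem.Str.split?]
    have : PySem.Chars.split? (String.ofList w).toList ("/" : String).toList
        = some (pvSplitc '/' w) := by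
      rw [String.toList_ofList]
      show PySem.Chars.split? w ['/'] = some (pvSplitc '/' w)
      rw [PySem.Chars.split?]
      simp [splitOn_single]
    rw [this]
    simp only [Option.map_some, Option.getD_some]
    rw [show ((-1 : Int)) = (-1 : Int) from rfl]
    have hg : PySem.List.pyGet? (List.map String.ofList (pvSplitc '/' w)) (-1)
        = some (String.ofList (pvLastc w)) := by
      rw [pyGet?_neg_one, List.getLast?_map, getLast?_pvSplitc_slash]
      rfl
    rw [hg]
    rfl
  · rw [if_neg ?_, pvLastc_of_not_mem w hm]
    rw [hslash]
    intro hc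
    exact hm (by simpa using (isIn_single '/' (String.ofList w)).mp hc)

-- A's fold over words, pushed to the character level
theorem foldl_str_toList (h : String → String) (ws : List String) :
    ∀ init : String,
      (List.foldl (fun ns w => ns ++ h w ++ " ") init ws).toList
        = init.toList ++ ws.flatMap (fun w => (h w).toList ++ [' ']) := by
  induction ws with
  | nil => intro init; simp
  | cons w t ih =>
    intro init
    rw [List.foldl_cons, ih]
    simp [String.toList_append]

-- B's scan, characterized by pvS
theorem scan_eq (cs : List Char) : ∀ acc cur : List Char,
    (List.foldl pvStep (acc, cur) cs).1 ++ (List.foldl pvStep (acc, cur) cs).2 ++ [' ']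
      = acc ++ pvS cs cur := by
  induction cs with
  | nil => intro acc cur; simp [pvS]
  | cons c t ih =>
    intro acc cur
    by_cases hsp : c = ' '
    · subst hsp
      rw [List.foldl_cons, show pvStep (acc, cur) ' ' = (acc ++ cur ++ [' '], []) from rfl, ih]
      simp [pvS]
    · by_cases hsl : c = '/'
      · subst hsl
        rw [List.foldl_cons, show pvStep (acc, cur) '/' = (acc, []) from by
          simp [pvStep], ih]
        simp [pvS]
      · rw [List.foldl_cons, show pvStep (acc, cur) c = (acc, cur ++ [c]) from by
          simp [pvStep, hsp, hsl], ih]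
        simp [pvS, hsp, hsl]

-- pvS equals the word-by-word picture A computes
theorem pvS_eq (cs : List Char) : ∀ cur : List Char,
    pvS cs cur
      = (if '/' ∈ (pvSplitc ' ' cs).headI then pvLastc (pvSplitc ' ' cs).headI
          else cur ++ (pvSplitc ' ' cs).headI) ++ [' ']
        ++ (pvSplitc ' ' cs).tail.flatMap (fun w => pvLastc w ++ [' ']) := by
  induction cs with
  | nil => intro cur; simp [pvS, pvSplitc]
  | cons c t ih =>
    intro cur
    by_cases hsp : c = ' '
    · subst hsp
      have hflat : pvS t [] = (pvSplitc ' ' t).flatMap (fun w => pvLastc w ++ [' ']) := by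
        rw [ih []]
        rw [← cons_headI_tail _ (pvSplitc_ne_nil ' ' t)]
        simp only [List.flatMap_cons, List.headI_cons, List.tail_cons]
        by_cases hm : '/' ∈ (pvSplitc ' ' t).headI
        · simp [hm]
        · simp [hm, pvLastc_of_not_mem _ hm]
      simp [pvS, pvSplitc, hflat]
    · by_cases hsl : c = '/'
      · subst hsl
        have h1 : pvS ('/' :: t) cur = pvS t [] := by simp [pvS]
        rw [h1, ih []]
        have hh : pvSplitc ' ' ('/' :: t)
            = ('/' :: (pvSplitc ' ' t).headI) :: (pvSplitc ' ' t).tail := by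
          simp [pvSplitc]
        rw [hh]
        simp only [List.headI_cons, List.tail_cons, List.mem_cons, true_or, if_pos]
        have hl : pvLastc ('/' :: (pvSplitc ' ' t).headI) = pvLastc (pvSplitc ' ' t).headI := by
          simp [pvLastc]
        rw [hl]
        by_cases hm : '/' ∈ (pvSplitc ' ' t).headI
        · simp [hm]
        · simp [hm, pvLastc_of_not_mem _ hm]
      · have h1 : pvS (c :: t) cur = pvS t (cur ++ [c]) := by simp [pvS, hsp, hsl]
        rw [h1, ih (cur ++ [c])]
        have hh : pvSplitc ' ' (c :: t)
            = (c :: (pvSplitc ' ' t).headI) :: (pvSplitc ' ' t).tail := by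
          simp [pvSplitc, hsp]
        rw [hh]
        simp only [List.headI_cons, List.tail_cons, List.mem_cons]
        have hcne : ¬ ('/' = c) := fun h => hsl h.symm
        by_cases hm : '/' ∈ (pvSplitc ' ' t).headI
        · have hl : pvLastc (c :: (pvSplitc ' ' t).headI) = pvLastc (pvSplitc ' ' t).headI := by
            simp [pvLastc, hsl, hm]
          simp [hm, hcne, hl]
        · simp [hm, hcne, pvLastc, hsl]

theorem split?_space (s : String) :
    (PySem.Str.split? s " ").getD [] = List.map String.ofList (pvSplitc ' ' s.toList) := by
  rw [PySem.Str.split?]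
  have : PySem.Chars.split? s.toList (" " : String).toList = some (pvSplitc ' ' s.toList) := by
    show PySem.Chars.split? s.toList [' '] = some (pvSplitc ' ' s.toList)
    rw [PySem.Chars.split?]
    simp [splitOn_single]
  rw [this]
  rfl

-- ===== VERDICT (by name: the statement is the Claim_ definition above) =====
theorem excise_paths_leaf_last_spec : Claim_equal_excise_paths_leaf_last := by
  unfold Claim_equal_excise_paths_leaf_last
  intro s _
  unfold Spec_excise_paths_leaf_last excise_paths_leaf_last excise_paths_leaf_last_alt
  have hsp : (" " : String) = String.ofList [' '] := rfl
  rw [split?_space s]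
  by_cases hmem : ' ' ∈ s.toList
  · have hlen : 1 < (List.map String.ofList (pvSplitc ' ' s.toList)).length := by
      have := two_le_pvSplitc_of_mem ' ' s.toList hmem
      simp only [List.length_map]
      omega
    rw [if_pos hlen, if_pos (by rw [hsp]; exact (isIn_single ' ' s).mpr hmem)]
    apply String.toList_inj.mp
    rw [foldl_str_toList _ _ ""]
    have hB := scan_eq s.toList [] []
    simp only [List.nil_append] at hB
    show _ = (String.ofList ((List.foldl pvStep ([], []) s.toList).1
      ++ (List.foldl pvStep ([], []) s.toList).2 ++ [' '])).toList
    rw [String.toList_ofList]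
    rw [hB, pvS_eq s.toList []]
    rw [List.flatMap_map]
    rw [← cons_headI_tail _ (pvSplitc_ne_nil ' ' s.toList)]
    simp only [List.flatMap_cons, List.headI_cons, List.tail_cons]
    simp only [aWord_eq, String.toList_ofList, List.nil_append]
    by_cases hm : '/' ∈ (pvSplitc ' ' s.toList).headI
    · simp [hm]
    · simp [hm, pvLastc_of_not_mem _ hm]
  · have hone : pvSplitc ' ' s.toList = [s.toList] := pvSplitc_of_not_mem ' ' s.toList hmem
    rw [hone]
    rw [if_neg (by simp), if_neg ?_]
    rw [hsp]
    intro hc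
    exact hmem ((isIn_single ' ' s).mp hc)
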